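-- pv_equiv track=rewrite | github.com/eyereasoner/eye | let/input/gps.py | stagecount
-- ===== SOURCE A (Python) =====
-- from typing import List, Dict, Tuple, Callable
--
-- def stagecount(maps: List[str]) -> int:
--     """Count the number of consecutive unique map_ids (stages) in a path."""
--     if not maps:
--         return 0
--     cnt = 1
--     for prev, curr in zip(maps, maps[1:]):
--         if curr != prev:
--             cnt += 1
--     return cnt
-- ===== SOURCE B (Python) =====
-- def stagecount(maps):
--     """Count the number of consecutive unique map_ids (stages) in a path.
--
--     Divide and conquer: count stages in each half, then merge; the two
--     counts overlap by one stage exactly when the run at the split point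
--     spans both halves.
--     """
--     n = len(maps)
--     if n == 0:
--         return 0
--     if n == 1:
--         return 1
--     mid = n // 2
--     left, right = maps[:mid], maps[mid:]
--     return stagecount(left) + stagecount(right) - (1 if left[-1] == right[0] else 0)
-- ===== Notes on version B (the rewrite author's own statement) =====
-- stated objective: alternative
-- what changed: Replaces A's single linear pass comparing each adjacent pair with a divide-and-conquer recursion: split the list in half, count stages in each half recursively, and subtract 1 when the run at the split boundary spans both halves.
import Mathlib
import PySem

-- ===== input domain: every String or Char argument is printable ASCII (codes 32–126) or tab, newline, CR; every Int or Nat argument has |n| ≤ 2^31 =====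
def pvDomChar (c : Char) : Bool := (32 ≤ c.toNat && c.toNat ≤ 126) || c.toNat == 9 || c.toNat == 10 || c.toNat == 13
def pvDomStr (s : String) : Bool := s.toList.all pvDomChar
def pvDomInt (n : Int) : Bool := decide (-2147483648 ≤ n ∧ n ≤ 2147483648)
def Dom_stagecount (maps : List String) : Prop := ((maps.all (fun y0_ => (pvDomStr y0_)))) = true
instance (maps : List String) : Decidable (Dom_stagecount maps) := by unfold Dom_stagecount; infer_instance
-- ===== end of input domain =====

-- B replaces A's single adjacent-pair scan with a divide-and-conquer recursion (alternative decomposition; same result).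

-- ===== PORT A =====
-- if not maps: return 0; cnt = 1; for prev, curr in zip(maps, maps[1:]): if curr != prev: cnt += 1; return cnt
def stagecount (maps : List String) : Int :=
  if maps = [] then 0
  else
    (maps.zip maps.tail).foldl (fun cnt pc => if pc.2 ≠ pc.1 then cnt + 1 else cnt) 1

-- ===== PORT B =====
-- split in half, recurse on both halves, subtract 1 if the boundary run spans both halves
def stagecount_alt (maps : List String) : Int :=
  match maps with
  | [] => 0
  | [_] => 1
  | x :: y :: t =>
    stagecount_alt ((x :: y :: t).take ((x :: y :: t).length / 2)) +
      stagecount_alt ((x :: y :: t).drop ((x :: y :: t).length / 2)) -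
      (if ((x :: y :: t).take ((x :: y :: t).length / 2)).getLast? ==
          ((x :: y :: t).drop ((x :: y :: t).length / 2)).head? then 1 else 0)
termination_by maps.length
decreasing_by
  · simp [List.length_take]
    omega
  · simp [List.length_drop]
    omega

-- ===== PRECONDITION & SPEC =====
def Spec_stagecount (maps : List String) (out : Int) : Prop := out = stagecount_alt maps
instance (maps : List String) (out : Int) : Decidable (Spec_stagecount maps out) := by unfold Spec_stagecount; infer_instance

-- ===== CLAIM (what is proved, stated in full; the proofs are below) =====
def Claim_equal_stagecount : Prop := ∀ (maps : List String), Dom_stagecount maps → Spec_stagecount maps (stagecount maps)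

-- ===== LEMMAS AND PROOFS =====

-- number of adjacent changes in xs given the previous element x
def pvTrans (x : String) (xs : List String) : Int :=
  match xs with
  | [] => 0
  | y :: ys => (if y ≠ x then 1 else 0) + pvTrans y ys

-- stage count characterisation: 0 on [], else 1 + number of adjacent changes
def pvCount (xs : List String) : Int :=
  match xs with
  | [] => 0
  | x :: t => 1 + pvTrans x t

theorem pvFoldl_trans (xs : List String) : ∀ (x : String) (c : Int),
    ((x :: xs).zip xs).foldl (fun cnt pc => if pc.2 ≠ pc.1 then cnt + 1 else cnt) c
      = c + pvTrans x xs := by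
  induction xs with
  | nil => intro x c; simp [pvTrans]
  | cons y ys ih =>
    intro x c
    simp only [List.zip_cons_cons, List.foldl_cons, pvTrans, ih]
    by_cases h : y = x
    · simp [h]
    · simp [h]; ring

theorem pvTrans_append (as : List String) : ∀ (x : String) (bs : List String),
    pvTrans x (as ++ bs) = pvTrans x as + pvTrans (as.getLastD x) bs := by
  induction as with
  | nil => intro x bs; simp [pvTrans]
  | cons a as' ih =>
    intro x bs
    simp only [List.cons_append, pvTrans, ih, List.getLastD_cons]
    ring

theorem pvGetLast?_cons (x : String) (as : List String) :
    (x :: as).getLast? = some (as.getLastD x) := by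
  induction as generalizing x with
  | nil => simp
  | cons a as' ih => simp [List.getLast?_cons_cons, ih]

theorem pvCount_append (l r : List String) (hl : l ≠ []) (hr : r ≠ []) :
    pvCount (l ++ r)
      = pvCount l + pvCount r - (if l.getLast? == r.head? then 1 else 0) := by
  match l, r with
  | x :: as, b :: bs =>
    simp only [List.cons_append, pvCount, pvTrans_append, pvTrans, pvGetLast?_cons,
      List.head?_cons]
    split_ifs with h1 h2 h2
    · simp only [beq_iff_eq, Option.some.injEq] at h2
      exact absurd h2.symm h1
    · ring
    · ring
    · push Not at h1
      simp only [beq_iff_eq, Option.some.injEq] at h2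
      exact absurd h1.symm h2

theorem pvAlt_eq_count : ∀ (n : Nat) (maps : List String), maps.length ≤ n →
    stagecount_alt maps = pvCount maps := by
  intro n
  induction n with
  | zero =>
    intro maps h
    have : maps = [] := List.eq_nil_of_length_eq_zero (Nat.le_zero.mp h)
    subst this; simp [stagecount_alt, pvCount]
  | succ n ih =>
    intro maps h
    match maps with
    | [] => simp [stagecount_alt, pvCount]
    | [x] => simp [stagecount_alt, pvCount, pvTrans]
    | x :: y :: t =>
      rw [stagecount_alt]
      have hlen : (x :: y :: t).length = t.length + 2 := by simp
      set m := (x :: y :: t).length / 2 with hm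
      have hm1 : 1 ≤ m := by rw [hm, hlen]; omega
      have hm2 : m < (x :: y :: t).length := by rw [hm, hlen] at *; omega
      have htake : ((x :: y :: t).take m).length = m := by
        simp [List.length_take]; omega
      have hdrop : ((x :: y :: t).drop m).length = (x :: y :: t).length - m := by
        simp [List.length_drop]
      have hln : (x :: y :: t).length ≤ n + 1 := h
      rw [ih _ (by omega), ih _ (by rw [hdrop]; omega)]
      rw [← pvCount_append ((x :: y :: t).take m) ((x :: y :: t).drop m)
            (by intro e; rw [e] at htake; simp at htake; omega)
            (by intro e; rw [e] at hdrop; simp at hdrop; omega)]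
      rw [List.take_append_drop]

-- ===== VERDICT (by name: the statement is the Claim_ definition above) =====
theorem stagecount_spec : Claim_equal_stagecount := by
  intro maps _
  unfold Spec_stagecount stagecount
  rw [pvAlt_eq_count maps.length maps (le_refl _)]
  match maps with
  | [] => simp [pvCount]
  | x :: xs =>
    simp only [List.tail_cons, if_neg (List.cons_ne_nil x xs), pvCount]
    rw [pvFoldl_trans]
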